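-- pv_equiv track=rewrite | github.com/vumarvinevorasousa/Local-Optima-in-the-HP-Protein-Model | fold_graph.py | calc_figsize
-- ===== SOURCE A (Python) =====
-- def calc_figsize(fold):
--     coords = [[0,0]]
--     for d in fold:
--         match d:
--             case "u":
--                 coords.append([coords[-1][0], coords[-1][1] + 1])
--             case "d":
--                 coords.append([coords[-1][0], coords[-1][1] - 1])
--             case "l":
--                 coords.append([coords[-1][0] - 1, coords[-1][1]])
--             case "r":
--                 coords.append([coords[-1][0] + 1, coords[-1][1]])
--
--     lim_x = [0,0]
--     lim_y = [0,0]
--     for coord in coords: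
--         lim_x = [min(lim_x[0], coord[0]), max(lim_x[1], coord[0])]
--         lim_y = [min(lim_y[0], coord[1]), max(lim_y[1], coord[1])]
--
--     return [len(range(lim_x[0], lim_x[1])) + 1, len(range(lim_y[0], lim_y[1])) + 1]
-- ===== SOURCE B (Python) =====
-- def calc_figsize(fold):
--     x = y = 0
--     min_x = max_x = min_y = max_y = 0
--     for d in fold:
--         if d == "u":
--             y += 1
--         elif d == "d":
--             y -= 1
--         elif d == "l":
--             x -= 1
--         elif d == "r":
--             x += 1
--         else:
--             continue
--         min_x = min(min_x, x)
--         max_x = max(max_x, x)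
--         min_y = min(min_y, y)
--         max_y = max(max_y, y)
--     return [max_x - min_x + 1, max_y - min_y + 1]
-- ===== Notes on version B (the rewrite author's own statement) =====
-- stated objective: simpler
-- what changed: Single pass over the fold maintaining only the current position and four running extremes, instead of materialising the whole coordinate list and scanning it again for the bounding box.
import Mathlib
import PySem

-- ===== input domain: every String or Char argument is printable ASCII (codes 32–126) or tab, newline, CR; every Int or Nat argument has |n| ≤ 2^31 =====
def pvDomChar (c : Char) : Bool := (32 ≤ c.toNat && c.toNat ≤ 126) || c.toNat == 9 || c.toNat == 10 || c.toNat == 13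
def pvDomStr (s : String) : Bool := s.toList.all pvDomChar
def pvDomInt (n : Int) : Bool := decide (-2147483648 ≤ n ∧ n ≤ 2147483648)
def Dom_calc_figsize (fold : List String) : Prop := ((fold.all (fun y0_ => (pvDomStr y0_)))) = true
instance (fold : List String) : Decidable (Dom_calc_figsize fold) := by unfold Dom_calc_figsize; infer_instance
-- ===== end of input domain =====

-- B replaces A's two passes (build the full coordinate list, then scan it for the
-- bounding box) with one pass keeping only the current position and four running
-- extremes; objective: simpler (O(1) extra space).


-- ===== PORT A =====
-- coords is kept in REVERSE order (newest first): Python's coords.append(f(coords[-1]))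
-- becomes consing f(head); the second loop then runs over rc.reverse, i.e. over coords
-- in Python's order.
def pvStepA (rc : List (Int × Int)) (d : String) : List (Int × Int) :=
  match rc with
  | [] => []  -- unreachable: rc starts nonempty and never shrinks
  | (x, y) :: _ =>
    if d = "u" then (x, y + 1) :: rc
    else if d = "d" then (x, y - 1) :: rc
    else if d = "l" then (x - 1, y) :: rc
    else if d = "r" then (x + 1, y) :: rc
    else rc

def pvStepLim (p : (Int × Int) × (Int × Int)) (c : Int × Int) : (Int × Int) × (Int × Int) :=
  ((min p.1.1 c.1, max p.1.2 c.1), (min p.2.1 c.2, max p.2.2 c.2))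

def calc_figsize (fold : List String) : List Int :=
  let rc := fold.foldl pvStepA [(0, 0)]
  let lims := rc.reverse.foldl pvStepLim ((0, 0), (0, 0))
  -- len(range(a,b)) = (b - a).toNat exactly (step-1 range)
  [((lims.1.2 - lims.1.1).toNat : Int) + 1, ((lims.2.2 - lims.2.1).toNat : Int) + 1]

-- ===== PORT B =====
-- state = (x, y, min_x, max_x, min_y, max_y)
def pvStepB (s : Int × Int × Int × Int × Int × Int) (d : String) :
    Int × Int × Int × Int × Int × Int :=
  match s with
  | (x, y, mnx, mxx, mny, mxy) =>
    if d = "u" then (x, y + 1, min mnx x, max mxx x, min mny (y + 1), max mxy (y + 1))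
    else if d = "d" then (x, y - 1, min mnx x, max mxx x, min mny (y - 1), max mxy (y - 1))
    else if d = "l" then (x - 1, y, min mnx (x - 1), max mxx (x - 1), min mny y, max mxy y)
    else if d = "r" then (x + 1, y, min mnx (x + 1), max mxx (x + 1), min mny y, max mxy y)
    else s

def calc_figsize_alt (fold : List String) : List Int :=
  match fold.foldl pvStepB (0, 0, 0, 0, 0, 0) with
  | (_, _, mnx, mxx, mny, mxy) => [mxx - mnx + 1, mxy - mny + 1]

-- ===== PRECONDITION & SPEC =====
def Spec_calc_figsize (fold : List String) (out : List Int) : Prop := out = calc_figsize_alt fold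
instance (fold : List String) (out : List Int) : Decidable (Spec_calc_figsize fold out) := by unfold Spec_calc_figsize; infer_instance

-- ===== CLAIM (what is proved, stated in full; the proofs are below) =====
def Claim_equal_calc_figsize : Prop := ∀ (fold : List String), Dom_calc_figsize fold → Spec_calc_figsize fold (calc_figsize fold)

-- ===== LEMMAS AND PROOFS =====

/-- The sequence of positions visited after the origin, in order. -/
def pvPoints : List String → Int → Int → List (Int × Int)
  | [], _, _ => []
  | d :: ds, x, y =>
    if d = "u" then (x, y + 1) :: pvPoints ds x (y + 1)
    else if d = "d" then (x, y - 1) :: pvPoints ds x (y - 1)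
    else if d = "l" then (x - 1, y) :: pvPoints ds (x - 1) y
    else if d = "r" then (x + 1, y) :: pvPoints ds (x + 1) y
    else pvPoints ds x y

theorem pvFoldA_eq (fold : List String) :
    ∀ (x y : Int) (rc : List (Int × Int)),
      fold.foldl pvStepA ((x, y) :: rc) = (pvPoints fold x y).reverse ++ (x, y) :: rc := by
  induction fold with
  | nil => intro x y rc; simp [pvPoints]
  | cons d ds ih =>
    intro x y rc
    by_cases hu : d = "u"
    · simp [pvStepA, pvPoints, hu, ih]
    · by_cases hd : d = "d"
      · simp [pvStepA, pvPoints, hu, hd, ih]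
      · by_cases hl : d = "l"
        · simp [pvStepA, pvPoints, hu, hd, hl, ih]
        · by_cases hr : d = "r"
          · simp [pvStepA, pvPoints, hu, hd, hl, hr, ih]
          · simp [pvStepA, pvPoints, hu, hd, hl, hr, ih]

/-- Extract B's four extremes into A's lim shape. -/
def pvExt (s : Int × Int × Int × Int × Int × Int) : (Int × Int) × (Int × Int) :=
  ((s.2.2.1, s.2.2.2.1), (s.2.2.2.2.1, s.2.2.2.2.2))

theorem pvFoldB_eq (fold : List String) :
    ∀ (x y mnx mxx mny mxy : Int),
      pvExt (fold.foldl pvStepB (x, y, mnx, mxx, mny, mxy))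
        = (pvPoints fold x y).foldl pvStepLim ((mnx, mxx), (mny, mxy)) := by
  induction fold with
  | nil => intro x y mnx mxx mny mxy; simp [pvPoints, pvExt]
  | cons d ds ih =>
    intro x y mnx mxx mny mxy
    by_cases hu : d = "u"
    · simp [pvStepB, pvPoints, pvStepLim, hu, ih]
    · by_cases hd : d = "d"
      · simp [pvStepB, pvPoints, pvStepLim, hu, hd, ih]
      · by_cases hl : d = "l"
        · simp [pvStepB, pvPoints, pvStepLim, hu, hd, hl, ih]
        · by_cases hr : d = "r"
          · simp [pvStepB, pvPoints, pvStepLim, hu, hd, hl, hr, ih]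
          · simp [pvStepB, pvPoints, hu, hd, hl, hr, ih]

theorem pvLim_le (l : List (Int × Int)) :
    ∀ (M : (Int × Int) × (Int × Int)), M.1.1 ≤ M.1.2 → M.2.1 ≤ M.2.2 →
      (l.foldl pvStepLim M).1.1 ≤ (l.foldl pvStepLim M).1.2 ∧
      (l.foldl pvStepLim M).2.1 ≤ (l.foldl pvStepLim M).2.2 := by
  induction l with
  | nil => intro M h1 h2; exact ⟨h1, h2⟩
  | cons c cs ih =>
    intro M h1 h2
    apply ih
    · simp only [pvStepLim]; omega
    · simp only [pvStepLim]; omega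

-- ===== VERDICT (by name: the statement is the Claim_ definition above) =====
theorem calc_figsize_spec : Claim_equal_calc_figsize := by
  intro fold _
  unfold Spec_calc_figsize calc_figsize calc_figsize_alt
  rw [pvFoldA_eq fold 0 0 []]
  have hB := pvFoldB_eq fold 0 0 0 0 0 0
  have h0 : pvStepLim ((0, 0), (0, 0)) (0, 0) = ((0, 0), (0, 0)) := by
    simp [pvStepLim]
  have hle := pvLim_le (pvPoints fold 0 0) ((0, 0), (0, 0)) (by norm_num) (by norm_num)
  rcases hfb : fold.foldl pvStepB (0, 0, 0, 0, 0, 0) with ⟨x', y', mnx, mxx, mny, mxy⟩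
  simp only [pvExt, hfb] at hB hle
  simp only [List.reverse_append, List.reverse_reverse, List.reverse_cons,
    List.reverse_nil, List.nil_append, List.cons_append]
  simp only [List.foldl_cons, h0]
  rw [← hB] at hle ⊢
  simp only [List.cons.injEq, and_true] at hle ⊢
  omega
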